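-- pv_equiv track=rewrite | github.com/OTOYO1020/ChatDev_Intermediate | WareHouse/C_177__20250512035946/calculator.py | calculate_sum_pairs
-- ===== SOURCE A (Python) =====
-- def calculate_sum_pairs(N: int, A: list) -> int:
--     total_sum = 0
--     MOD = 10**9 + 7
--     # Iterate over all pairs (i, j) with i < j
--     for i in range(N):
--         for j in range(i + 1, N):
--             total_sum += A[i] * A[j]
--             total_sum %= MOD  # Update total_sum modulo MOD
--     return total_sum
-- ===== SOURCE B (Python) =====
-- def calculate_sum_pairs(N: int, A: list) -> int:
--     MOD = 10**9 + 7
--     total = 0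
--     prefix = 0
--     # each A[i] is multiplied by the sum of all earlier elements (one linear pass)
--     for i in range(1, N):
--         prefix += A[i - 1]
--         total += A[i] * prefix
--     return total % MOD
-- ===== Notes on version B (the rewrite author's own statement) =====
-- stated objective: faster
-- what changed: Replaces the nested all-pairs loop by a single pass keeping a running prefix sum (each element is multiplied by the sum of all earlier elements), reducing from quadratic to linear.
import Mathlib
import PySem

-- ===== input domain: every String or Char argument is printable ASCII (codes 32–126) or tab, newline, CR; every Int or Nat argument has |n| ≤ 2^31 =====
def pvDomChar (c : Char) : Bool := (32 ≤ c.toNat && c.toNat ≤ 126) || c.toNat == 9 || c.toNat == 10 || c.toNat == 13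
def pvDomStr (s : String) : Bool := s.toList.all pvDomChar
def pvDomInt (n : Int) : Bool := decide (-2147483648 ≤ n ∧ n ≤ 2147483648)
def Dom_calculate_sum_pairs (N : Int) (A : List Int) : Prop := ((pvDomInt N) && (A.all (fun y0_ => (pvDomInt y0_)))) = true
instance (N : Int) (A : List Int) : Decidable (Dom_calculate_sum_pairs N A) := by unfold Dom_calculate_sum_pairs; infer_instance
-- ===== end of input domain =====

-- B replaces A's quadratic nested pair loop by a single linear pass with a running pref sum;
-- a timing run measured it asymptotically faster. Pre_ excludes only the inputs where A
-- raises IndexError (2 ≤ N and N > len(A)); B raises there too.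


-- ===== PORT A =====
-- literal transliteration of A: nested index loops, total reduced mod 10^9+7 at every step
def calculate_sum_pairs (N : Int) (A : List Int) : Int :=
  (PySem.List.pyRange 0 N 1).foldl (fun total_sum i =>
    (PySem.List.pyRange (i + 1) N 1).foldl (fun t j =>
      PySem.Int.mod (t + PySem.List.pyGetD A i 0 * PySem.List.pyGetD A j 0) (10 ^ 9 + 7)) total_sum) 0

-- ===== PORT B =====
-- literal transliteration of B: one pass over i = 1 .. N-1 carrying (total, pref)
def calculate_sum_pairs_alt (N : Int) (A : List Int) : Int :=
  let p := (PySem.List.pyRange 1 N 1).foldl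
      (fun (tp : Int × Int) i =>
        let pref := tp.2 + PySem.List.pyGetD A (i - 1) 0
        (tp.1 + PySem.List.pyGetD A i 0 * pref, pref)) (0, 0)
  PySem.Int.mod p.1 (10 ^ 9 + 7)

-- ===== PRECONDITION & SPEC =====
-- A raises IndexError exactly when 2 ≤ N and N > len(A); B raises there too (it is not in the claim)
def Pre_calculate_sum_pairs (N : Int) (A : List Int) : Prop := N ≤ (A.length : Int) ∨ N ≤ 1
instance (N : Int) (A : List Int) : Decidable (Pre_calculate_sum_pairs N A) := by
  unfold Pre_calculate_sum_pairs; infer_instance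

def pvWitness_calculate_sum_pairs : Int × List Int := (2, [3, 5])

def Spec_calculate_sum_pairs (N : Int) (A : List Int) (out : Int) : Prop := out = calculate_sum_pairs_alt N A
instance (N : Int) (A : List Int) (out : Int) : Decidable (Spec_calculate_sum_pairs N A out) := by
  unfold Spec_calculate_sum_pairs; infer_instance

-- ===== CLAIM (what is proved, stated in full; the proofs are below) =====
def Claim_equal_calculate_sum_pairs : Prop := ∀ (N : Int) (A : List Int), Dom_calculate_sum_pairs N A → Pre_calculate_sum_pairs N A → Spec_calculate_sum_pairs N A (calculate_sum_pairs N A)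

-- ===== LEMMAS AND PROOFS =====

-- Σ_{i<j} l_i * l_j, recursively
def pairQ : List Int → Int
  | [] => 0
  | x :: xs => x * xs.sum + pairQ xs

theorem pairQ_short (l : List Int) (h : l.length ≤ 1) : pairQ l = 0 := by
  match l, h with
  | [], _ => rfl
  | [x], _ => simp [pairQ]

theorem pymod_eq (x : Int) : PySem.Int.mod x (10 ^ 9 + 7) = x % (10 ^ 9 + 7) :=
  PySem.Int.mod_eq_emod_of_pos (by norm_num)

theorem fold_mod (f : Int → Int) (l : List Int) (t : Int) (h : l ≠ []) :
    l.foldl (fun t j => (t + f j) % (10 ^ 9 + 7)) t = (t + (l.map f).sum) % (10 ^ 9 + 7) := by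
  induction l generalizing t with
  | nil => exact absurd rfl h
  | cons x xs ih =>
    rcases xs with _ | ⟨y, ys⟩
    · simp
    · rw [List.foldl_cons, ih _ (by simp), Int.emod_add_emod]
      simp [add_assoc]

theorem map_g (A : List Int) (N k : Int) (hk : 0 ≤ k) (hN : N ≤ (A.length : Int)) :
    (PySem.List.pyRange k N 1).map (fun j => PySem.List.pyGetD A j 0)
      = (A.take N.toNat).drop k.toNat := by
  by_cases hkN : N ≤ k
  · rw [PySem.List.pyRange_one_eq_nil hkN, List.map_nil,
      List.drop_eq_nil_of_le (by simp; omega)]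
  · replace hkN : k < N := by omega
    have hrec := map_g A N (k + 1) (by omega) hN
    rw [PySem.List.pyRange_one_cons hkN, List.map_cons, hrec]
    have hlt : k.toNat < (A.take N.toNat).length := by simp; omega
    rw [List.drop_eq_getElem_cons hlt]
    have h1 : (k + 1).toNat = k.toNat + 1 := by omega
    rw [h1]
    congr 1
    rw [List.getElem_take, PySem.List.pyGetD_eq_getElem A 0 hk (by omega)]
termination_by (N - k).toNat
decreasing_by omega

-- inner loop of A
theorem inner_eq (A : List Int) (N i : Int) (hi : 0 ≤ i) (hN : N ≤ (A.length : Int)) (t : Int) :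
    (PySem.List.pyRange (i + 1) N 1).foldl
        (fun t j => (t + PySem.List.pyGetD A i 0 * PySem.List.pyGetD A j 0) % (10 ^ 9 + 7)) t
      = if i + 1 < N then
          (t + PySem.List.pyGetD A i 0 * ((A.take N.toNat).drop (i + 1).toNat).sum) % (10 ^ 9 + 7)
        else t := by
  by_cases h : i + 1 < N
  · rw [if_pos h]
    have hne : PySem.List.pyRange (i + 1) N 1 ≠ [] := by
      rw [PySem.List.pyRange_one_cons h]; simp
    rw [fold_mod (fun j => PySem.List.pyGetD A i 0 * PySem.List.pyGetD A j 0) _ t hne]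
    congr 2
    rw [List.sum_map_mul_left, map_g A N (i + 1) (by omega) hN]
  · rw [if_neg h, PySem.List.pyRange_one_eq_nil (by omega), List.foldl_nil]

-- outer loop of A
theorem outer_eq (A : List Int) (N k : Int) (hk : 0 ≤ k) (hN : N ≤ (A.length : Int)) (t : Int) :
    (PySem.List.pyRange k N 1).foldl (fun total_sum i =>
        (PySem.List.pyRange (i + 1) N 1).foldl
          (fun t j => (t + PySem.List.pyGetD A i 0 * PySem.List.pyGetD A j 0) % (10 ^ 9 + 7))
          total_sum) t
      = if k + 2 ≤ N then (t + pairQ ((A.take N.toNat).drop k.toNat)) % (10 ^ 9 + 7) else t := by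
  by_cases hkN : N ≤ k
  · rw [PySem.List.pyRange_one_eq_nil hkN, List.foldl_nil, if_neg (by omega)]
  · replace hkN : k < N := by omega
    rw [PySem.List.pyRange_one_cons hkN, List.foldl_cons, inner_eq A N k hk hN t]
    have hlt : k.toNat < (A.take N.toNat).length := by rw [List.length_take]; omega
    have hdrop : (A.take N.toNat).drop k.toNat
        = (A.take N.toNat)[k.toNat] :: (A.take N.toNat).drop (k.toNat + 1) :=
      List.drop_eq_getElem_cons hlt
    have hgk : (A.take N.toNat)[k.toNat] = PySem.List.pyGetD A k 0 := by
      rw [List.getElem_take, PySem.List.pyGetD_eq_getElem A 0 hk (by omega)]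
    have h1 : (k + 1).toNat = k.toNat + 1 := by omega
    have hrec := outer_eq A N (k + 1) (by omega) hN
    by_cases h : k + 1 < N
    · rw [if_pos h, hrec]
      by_cases h3 : k + 1 + 2 ≤ N
      · rw [if_pos h3, if_pos (show k + 2 ≤ N by omega), Int.emod_add_emod, hdrop]
        simp only [pairQ, hgk, h1]
        congr 1
        ring
      · rw [if_neg h3, if_pos (show k + 2 ≤ N by omega), hdrop]
        have hQ : pairQ ((A.take N.toNat).drop (k.toNat + 1)) = 0 := by
          apply pairQ_short; rw [List.length_drop, List.length_take]; omega
        simp only [pairQ, hgk, h1, hQ, add_zero]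
    · rw [if_neg h, hrec, if_neg (by omega), if_neg (by omega)]
termination_by (N - k).toNat
decreasing_by omega

theorem a_eq (A : List Int) (N : Int) (hN : N ≤ (A.length : Int) ∨ N ≤ 1) :
    calculate_sum_pairs N A
      = if 2 ≤ N then pairQ (A.take N.toNat) % (10 ^ 9 + 7) else 0 := by
  unfold calculate_sum_pairs
  simp only [pymod_eq]
  by_cases h2 : 2 ≤ N
  · have hN' : N ≤ (A.length : Int) := by omega
    rw [outer_eq A N 0 le_rfl hN' 0, if_pos (by omega)]
    simp [h2]
  · rw [if_neg h2]
    by_cases h0 : N ≤ 0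
    · rw [PySem.List.pyRange_one_eq_nil (by omega), List.foldl_nil]
    · have hN1 : N = 1 := by omega
      subst hN1
      rw [PySem.List.pyRange_one_cons (by omega), PySem.List.pyRange_one_eq_nil (by omega)]
      simp [PySem.List.pyRange_one_eq_nil]

-- B's loop invariant: from index k (1 ≤ k), the total gains s times the tail sum plus all
-- products of pairs inside the segment A[k-1 .. N-1]
theorem b_outer (A : List Int) (N k : Int) (hk : 1 ≤ k) (hN : N ≤ (A.length : Int)) (t s : Int) :
    ((PySem.List.pyRange k N 1).foldl
        (fun (tp : Int × Int) i =>
          let pref := tp.2 + PySem.List.pyGetD A (i - 1) 0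
          (tp.1 + PySem.List.pyGetD A i 0 * pref, pref)) (t, s)).1
      = t + s * (((A.take N.toNat).drop (k.toNat - 1)).drop 1).sum
          + pairQ ((A.take N.toNat).drop (k.toNat - 1)) := by
  by_cases hkN : N ≤ k
  · rw [PySem.List.pyRange_one_eq_nil hkN, List.foldl_nil]
    have hlen : ((A.take N.toNat).drop (k.toNat - 1)).length ≤ 1 := by
      rw [List.length_drop, List.length_take]; omega
    rw [pairQ_short _ hlen, List.drop_eq_nil_of_le (by omega)]
    simp
  · replace hkN : k < N := by omega
    rw [PySem.List.pyRange_one_cons hkN, List.foldl_cons]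
    have hN2 : 2 ≤ N := by omega
    have hlt1 : k.toNat - 1 < (A.take N.toNat).length := by rw [List.length_take]; omega
    have hlt2 : k.toNat < (A.take N.toNat).length := by rw [List.length_take]; omega
    have hdrop1 : (A.take N.toNat).drop (k.toNat - 1)
        = (A.take N.toNat)[k.toNat - 1] :: (A.take N.toNat).drop (k.toNat - 1 + 1) :=
      List.drop_eq_getElem_cons hlt1
    have hdrop2 : (A.take N.toNat).drop k.toNat
        = (A.take N.toNat)[k.toNat] :: (A.take N.toNat).drop (k.toNat + 1) :=
      List.drop_eq_getElem_cons hlt2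
    have hg1 : (A.take N.toNat)[k.toNat - 1] = PySem.List.pyGetD A (k - 1) 0 := by
      rw [List.getElem_take, PySem.List.pyGetD_eq_getElem A 0 (by omega) (by omega)]
      congr 1; omega
    have hg2 : (A.take N.toNat)[k.toNat] = PySem.List.pyGetD A k 0 := by
      rw [List.getElem_take, PySem.List.pyGetD_eq_getElem A 0 (by omega) (by omega)]
    have hk1 : k.toNat - 1 + 1 = k.toNat := by omega
    have hk2 : (k + 1).toNat - 1 = k.toNat := by omega
    have hrec := b_outer A N (k + 1) (by omega) hN
      (t + PySem.List.pyGetD A k 0 * (s + PySem.List.pyGetD A (k - 1) 0))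
      (s + PySem.List.pyGetD A (k - 1) 0)
    rw [hk2] at hrec
    simp only []
    rw [hrec, hdrop1, hk1, hdrop2, hg1, hg2]
    simp only [pairQ, List.drop_succ_cons, List.drop_zero, List.sum_cons]
    ring
termination_by (N - k).toNat
decreasing_by omega

theorem b_eq (A : List Int) (N : Int) (hN : N ≤ (A.length : Int) ∨ N ≤ 1) :
    calculate_sum_pairs_alt N A
      = if 2 ≤ N then pairQ (A.take N.toNat) % (10 ^ 9 + 7) else 0 := by
  simp only [calculate_sum_pairs_alt, pymod_eq]
  by_cases h2 : 2 ≤ N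
  · rw [if_pos h2, b_outer A N 1 le_rfl (by omega) 0 0]
    simp
  · rw [if_neg h2, PySem.List.pyRange_one_eq_nil (by omega), List.foldl_nil]
    rfl

-- ===== VERDICT (by name: the statement is the Claim_ definition above) =====
theorem calculate_sum_pairs_spec : Claim_equal_calculate_sum_pairs := by
  intro N A _ hpre
  unfold Spec_calculate_sum_pairs
  rw [a_eq A N hpre, b_eq A N hpre]
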